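-- pv_equiv track=rewrite | github.com/mlwagman/heavy_quark_nuclei | testmas.py | count_transpositions_baryons
-- ===== SOURCE A (Python) =====
-- def count_transpositions_baryons(perm, group1, group2):
--     transpositions = 1  # Start with a factor of +1
--
--     for i in range(len(perm)):
--         for j in range(i + 1, len(perm)):
--             # Check if the current pair involves a within-group swap
--             if (i in group1 and j in group1) or (i in group2 and j in group2):
--                 if perm[i] > perm[j]:  # If out of order, it's a transposition
--                     transpositions *= -1
--             # Check if the current pair involves a between-group swap
--             elif (i in group1 and j in group2) or (i in group2 and j in group1):
--                 if perm[i] > perm[j]:  # If out of order, it's a transposition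
--                     transpositions *= 1  # Keep the factor the same (implicitly +1)
--
--     return transpositions
-- ===== SOURCE B (Python) =====
-- def _sortcount(xs):
--     # merge sort returning (sorted list, number of inversions)
--     if len(xs) <= 1:
--         return xs, 0
--     mid = len(xs) // 2
--     left, cl = _sortcount(xs[:mid])
--     right, cr = _sortcount(xs[mid:])
--     merged = []
--     c = 0
--     i = j = 0
--     while i < len(left) and j < len(right):
--         if left[i] <= right[j]:
--             merged.append(left[i])
--             i += 1
--         else:
--             merged.append(right[j])
--             c += len(left) - i
--             j += 1
--     merged += left[i:]
--     merged += right[j:]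
--     return merged, cl + cr + c
--
--
-- def count_transpositions_baryons(perm, group1, group2):
--     g1 = set(group1)
--     g2 = set(group2)
--     n = len(perm)
--     sub1 = [perm[i] for i in range(n) if i in g1]
--     sub2 = [perm[i] for i in range(n) if i in g2]
--     sub12 = [perm[i] for i in range(n) if i in g1 and i in g2]
--     # inclusion-exclusion: within-group inversions counted once each
--     total = _sortcount(sub1)[1] + _sortcount(sub2)[1] - _sortcount(sub12)[1]
--     return -1 if total % 2 else 1
-- ===== Notes on version B (the rewrite author's own statement) =====
-- stated objective: faster
-- what changed: Replaces the O(n^2) index-pair double loop with list membership tests by set-based extraction of the two group subsequences (plus their overlap) and merge-sort inversion counting with inclusion-exclusion, returning (-1)^inversions.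
import Mathlib
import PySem

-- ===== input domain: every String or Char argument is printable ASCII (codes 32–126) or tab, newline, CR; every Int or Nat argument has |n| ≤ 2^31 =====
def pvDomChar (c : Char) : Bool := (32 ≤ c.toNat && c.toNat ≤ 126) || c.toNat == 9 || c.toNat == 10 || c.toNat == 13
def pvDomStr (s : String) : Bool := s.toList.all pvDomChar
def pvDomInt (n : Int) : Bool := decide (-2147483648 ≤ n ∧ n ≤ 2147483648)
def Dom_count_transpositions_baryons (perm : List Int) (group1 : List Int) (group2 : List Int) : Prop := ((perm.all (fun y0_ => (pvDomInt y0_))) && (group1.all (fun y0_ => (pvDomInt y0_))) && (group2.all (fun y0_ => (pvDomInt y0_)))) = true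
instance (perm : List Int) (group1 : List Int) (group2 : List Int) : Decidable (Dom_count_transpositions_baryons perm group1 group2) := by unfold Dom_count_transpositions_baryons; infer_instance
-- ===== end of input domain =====

-- B replaces A's O(n^2) index-pair double loop (with list membership tests) by set-based
-- extraction of the group subsequences and merge-sort inversion counting with
-- inclusion-exclusion; the sign is (-1)^(number of within-group inversions).

-- ===== PORT A =====
-- Indices i, j are always in range of perm, so pyGetD with default 0 is exact here.
def count_transpositions_baryons (perm : List Int) (group1 : List Int) (group2 : List Int) : Int :=
  (PySem.List.pyRange 0 (perm.length : Int) 1).foldl (fun t i =>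
    (PySem.List.pyRange (i + 1) (perm.length : Int) 1).foldl (fun t j =>
      if (group1.contains i && group1.contains j) || (group2.contains i && group2.contains j) then
        (if PySem.List.pyGetD perm j 0 < PySem.List.pyGetD perm i 0 then t * (-1) else t)
      else if (group1.contains i && group2.contains j) || (group2.contains i && group1.contains j) then
        (if PySem.List.pyGetD perm j 0 < PySem.List.pyGetD perm i 0 then t * 1 else t)
      else t) t) 1

-- ===== PORT B =====
-- merge of two runs, counting cross inversions (transliteration of the merge loop in Source B)
def pvMerge : List Int → List Int → List Int × Nat
  | [], r => (r, 0)
  | a :: l, [] => (a :: l, 0)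
  | a :: l, b :: r =>
    if a ≤ b then
      let p := pvMerge l (b :: r); (a :: p.1, p.2)
    else
      let p := pvMerge (a :: l) r; (b :: p.1, p.2 + (a :: l).length)
termination_by l r => l.length + r.length

-- merge sort returning (sorted list, inversion count) (transliteration of _sortcount in Source B)
def pvSortCount (xs : List Int) : List Int × Nat :=
  if xs.length ≤ 1 then (xs, 0)
  else
    let mid := xs.length / 2
    let L := pvSortCount (xs.take mid)
    let R := pvSortCount (xs.drop mid)
    let m := pvMerge L.1 R.1
    (m.1, L.2 + R.2 + m.2)
termination_by xs.length
decreasing_by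
  · simp; omega
  · simp; omega

def count_transpositions_baryons_alt (perm : List Int) (group1 : List Int) (group2 : List Int) : Int :=
  let g1 : PySem.Set Int := PySem.Set.ofList group1
  let g2 : PySem.Set Int := PySem.Set.ofList group2
  let idx := PySem.List.pyRange 0 (perm.length : Int) 1
  let sub1 := (idx.filter (fun i => PySem.Set.contains g1 i)).map (fun i => PySem.List.pyGetD perm i 0)
  let sub2 := (idx.filter (fun i => PySem.Set.contains g2 i)).map (fun i => PySem.List.pyGetD perm i 0)
  let sub12 := (idx.filter (fun i => PySem.Set.contains g1 i && PySem.Set.contains g2 i)).map (fun i => PySem.List.pyGetD perm i 0)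
  let total : Int := ((pvSortCount sub1).2 : Int) + ((pvSortCount sub2).2 : Int) - ((pvSortCount sub12).2 : Int)
  if PySem.Int.mod total 2 ≠ 0 then -1 else 1

-- ===== PRECONDITION & SPEC =====
def Spec_count_transpositions_baryons (perm : List Int) (group1 : List Int) (group2 : List Int) (out : Int) : Prop := out = count_transpositions_baryons_alt perm group1 group2
instance (perm : List Int) (group1 : List Int) (group2 : List Int) (out : Int) : Decidable (Spec_count_transpositions_baryons perm group1 group2 out) := by unfold Spec_count_transpositions_baryons; infer_instance

-- ===== CLAIM (what is proved, stated in full; the proofs are below) =====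
def Claim_equal_count_transpositions_baryons : Prop := ∀ (perm : List Int) (group1 : List Int) (group2 : List Int), Dom_count_transpositions_baryons perm group1 group2 → Spec_count_transpositions_baryons perm group1 group2 (count_transpositions_baryons perm group1 group2)

-- ===== LEMMAS AND PROOFS =====

-- number of ordered pairs (earlier, later) of xs satisfying R
def pvPairCount (R : Int → Int → Bool) : List Int → Nat
  | [] => 0
  | a :: l => l.countP (R a) + pvPairCount R l

-- inversions of a list
def pvInv (xs : List Int) : Nat := pvPairCount (fun a b => decide (b < a)) xs

-- cross inversions between two lists
def pvCross (l r : List Int) : Nat := (l.map (fun a => r.countP (fun b => decide (b < a)))).sum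

lemma pv_foldl_sign (f : Int → Bool) (body : Int → Int → Int)
    (h : ∀ t x, body t x = if f x then -t else t) :
    ∀ (l : List Int) (t : Int), l.foldl body t = t * (-1) ^ (l.countP f) := by
  intro l
  induction l with
  | nil => intro t; simp
  | cons a l ih =>
    intro t
    simp only [List.foldl_cons, ih, h, List.countP_cons]
    by_cases hfa : f a = true <;> simp [hfa, pow_succ] <;> ring

lemma pvMerge_perm : ∀ (l r : List Int), (pvMerge l r).1.Perm (l ++ r) := by
  intro l r
  fun_induction pvMerge l r with
  | case1 r => simp [pvMerge]
  | case2 a l => simp [pvMerge]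
  | case3 a l b r hle p ih =>
    simp only [pvMerge, if_pos hle]
    exact (ih.cons a)
  | case4 a l b r hle p ih =>
    simp only [pvMerge, if_neg hle]
    refine (ih.cons b).trans ?_
    exact (List.perm_middle.symm.trans (by simp)).symm.symm
  
lemma pvMerge_sorted : ∀ (l r : List Int), l.Pairwise (· ≤ ·) → r.Pairwise (· ≤ ·) →
    (pvMerge l r).1.Pairwise (· ≤ ·) := by
  intro l r
  fun_induction pvMerge l r with
  | case1 r => intro _ hr; simpa [pvMerge] using hr
  | case2 a l => intro hl _; simpa [pvMerge] using hl
  | case3 a l b r hle p ih =>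
    intro hl hr
    simp only [pvMerge, if_pos hle]
    rw [List.pairwise_cons]
    refine ⟨?_, ih (List.pairwise_cons.mp hl).2 hr⟩
    intro x hx
    have hx' : x ∈ l ++ (b :: r) := (pvMerge_perm l (b :: r)).mem_iff.mp hx
    rcases List.mem_append.mp hx' with h1 | h2
    · exact (List.pairwise_cons.mp hl).1 x h1
    · rcases List.mem_cons.mp h2 with rfl | h3
      · exact hle
      · exact le_trans hle ((List.pairwise_cons.mp hr).1 x h3)
  | case4 a l b r hle p ih =>
    intro hl hr
    simp only [pvMerge, if_neg hle]
    rw [List.pairwise_cons]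
    refine ⟨?_, ih hl (List.pairwise_cons.mp hr).2⟩
    intro x hx
    have hx' : x ∈ (a :: l) ++ r := (pvMerge_perm (a :: l) r).mem_iff.mp hx
    have hba : b ≤ a := le_of_lt (lt_of_not_ge hle)
    rcases List.mem_append.mp hx' with h1 | h2
    · rcases List.mem_cons.mp h1 with rfl | h3
      · exact hba
      · exact le_trans hba ((List.pairwise_cons.mp hl).1 x h3)
    · exact (List.pairwise_cons.mp hr).1 x h2

lemma pvMerge_count : ∀ (l r : List Int), l.Pairwise (· ≤ ·) → r.Pairwise (· ≤ ·) →
    (pvMerge l r).2 = pvCross l r := by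
  intro l r
  fun_induction pvMerge l r with
  | case1 r => intro _ _; simp [pvMerge, pvCross]
  | case2 a l => intro _ _; simp [pvMerge, pvCross]
  | case3 a l b r hle p ih =>
    intro hl hr
    simp only [pvMerge, if_pos hle]
    have h0 : (b :: r).countP (fun y => decide (y < a)) = 0 := by
      rw [List.countP_eq_zero]
      intro y hy
      rcases List.mem_cons.mp hy with rfl | h3
      · simpa using not_lt.mpr hle
      · exact by simpa using not_lt.mpr (le_trans hle ((List.pairwise_cons.mp hr).1 y h3))
    rw [ih (List.pairwise_cons.mp hl).2 hr]
    simp [pvCross, h0]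
  | case4 a l b r hle p ih =>
    intro hl hr
    simp only [pvMerge, if_neg hle]
    rw [ih hl (List.pairwise_cons.mp hr).2]
    have hba : ∀ x ∈ a :: l, b < x := by
      intro x hx
      rcases List.mem_cons.mp hx with rfl | h3
      · exact lt_of_not_ge hle
      · exact lt_of_lt_of_le (lt_of_not_ge hle) ((List.pairwise_cons.mp hl).1 x h3)
    have hmap : (a :: l).map (fun x => (b :: r).countP (fun y => decide (y < x)))
        = (a :: l).map (fun x => 1 + r.countP (fun y => decide (y < x))) := by
      apply List.map_congr_left
      intro x hx
      simp [List.countP_cons, hba x hx, Nat.add_comm]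
    simp only [pvCross, hmap]
    have : ∀ (m : List Int) (g : Int → Nat),
        (m.map (fun x => 1 + g x)).sum = m.length + (m.map g).sum := by
      intro m g
      induction m with
      | nil => simp
      | cons c m ihm => simp [ihm]; omega
    rw [this]
    omega

lemma pv_cross_perm (l l' r r' : List Int) (h1 : l.Perm l') (h2 : r.Perm r') :
    pvCross l r = pvCross l' r' := by
  unfold pvCross
  have hmap : ∀ (m : List Int), m.map (fun a => r.countP (fun b => decide (b < a)))
      = m.map (fun a => r'.countP (fun b => decide (b < a))) := by
    intro m
    apply List.map_congr_left
    intro a _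
    exact h2.countP_eq _
  rw [hmap]
  exact (h1.map _).sum_eq

lemma pv_inv_append : ∀ (l r : List Int), pvInv (l ++ r) = pvInv l + pvInv r + pvCross l r := by
  intro l r
  induction l with
  | nil => simp [pvInv, pvPairCount, pvCross]
  | cons a l ih =>
    simp only [List.cons_append, pvInv, pvPairCount, List.countP_append, pvCross, List.map_cons,
      List.sum_cons] at *
    omega

lemma pvSortCount_spec : ∀ (xs : List Int),
    (pvSortCount xs).1.Perm xs ∧ (pvSortCount xs).1.Pairwise (· ≤ ·) ∧ (pvSortCount xs).2 = pvInv xs := by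
  intro xs
  fun_induction pvSortCount xs with
  | case1 xs h =>
    refine ⟨List.Perm.refl _, ?_, ?_⟩
    · match xs, h with
      | [], _ => exact List.Pairwise.nil
      | [a], _ => simp
    · match xs, h with
      | [], _ => simp [pvInv, pvPairCount]
      | [a], _ => simp [pvInv, pvPairCount]
  | case2 xs h mid L R m ihT ihD =>
    obtain ⟨hLp, hLs, hLc⟩ := ihT
    obtain ⟨hRp, hRs, hRc⟩ := ihD
    have hmp : m.1.Perm (L.1 ++ R.1) := pvMerge_perm L.1 R.1
    have happ : xs.take mid ++ xs.drop mid = xs := List.take_append_drop mid xs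
    refine ⟨?_, pvMerge_sorted L.1 R.1 hLs hRs, ?_⟩
    · exact hmp.trans ((hLp.append hRp).trans (by rw [happ]))
    · rw [pvMerge_count L.1 R.1 hLs hRs, hLc, hRc,
        pv_cross_perm L.1 (xs.take mid) R.1 (xs.drop mid) hLp hRp]
      have := pv_inv_append (xs.take mid) (xs.drop mid)
      rw [happ] at this
      omega

lemma pv_inv_filter (p : Int → Bool) (v : Int → Int) :
    ∀ (xs : List Int), pvInv ((xs.filter p).map v)
      = pvPairCount (fun a b => p a && (p b && decide (v b < v a))) xs := by
  intro xs
  induction xs with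
  | nil => simp [pvInv, pvPairCount]
  | cons a xs ih =>
    by_cases hpa : p a = true
    · simp only [List.filter_cons, hpa, if_pos, List.map_cons, pvInv, pvPairCount,
        List.countP_map] at *
      rw [ih]
      congr 1
      rw [List.countP_filter]
      apply List.countP_congr
      intro b _
      simp [hpa, Function.comp, Bool.and_comm]
    · have hpa' : p a = false := by simpa using hpa
      simp only [List.filter_cons, hpa', Bool.false_eq_true, if_false, pvPairCount,
        Bool.false_and, List.countP_false, Function.const]
      rw [ih]
      omega

lemma pv_countP_ie (f g h1 h2 : Int → Bool)
    (hpt : ∀ x, ((if f x then 1 else 0) + (if g x then 1 else 0) : Nat)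
      = (if h1 x then 1 else 0) + (if h2 x then 1 else 0)) :
    ∀ (l : List Int), l.countP f + l.countP g = l.countP h1 + l.countP h2 := by
  intro l
  induction l with
  | nil => simp
  | cons a l ih =>
    simp only [List.countP_cons]
    have := hpt a
    omega

lemma pv_pairCount_ie (m1 m2 : Int → Bool) (lt : Int → Int → Bool) :
    ∀ (xs : List Int),
      pvPairCount (fun i j => ((m1 i && m1 j) || (m2 i && m2 j)) && lt i j) xs
        + pvPairCount (fun i j => (m1 i && m2 i) && ((m1 j && m2 j) && lt i j)) xs
      = pvPairCount (fun i j => m1 i && (m1 j && lt i j)) xs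
        + pvPairCount (fun i j => m2 i && (m2 j && lt i j)) xs := by
  intro xs
  induction xs with
  | nil => simp [pvPairCount]
  | cons a xs ih =>
    simp only [pvPairCount]
    have hhead := pv_countP_ie
      (fun j => ((m1 a && m1 j) || (m2 a && m2 j)) && lt a j)
      (fun j => (m1 a && m2 a) && ((m1 j && m2 j) && lt a j))
      (fun j => m1 a && (m1 j && lt a j))
      (fun j => m2 a && (m2 j && lt a j))
      (by
        intro x
        cases hm1a : m1 a <;> cases hm2a : m2 a <;> cases hm1x : m1 x <;> cases hm2x : m2 x <;>
          cases hlt : lt a x <;> simp_all)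
      xs
    omega

-- sign of a parity
lemma pv_neg_one_pow (c : Nat) : ((-1 : Int)) ^ c = if c % 2 = 0 then 1 else -1 := by
  induction c with
  | zero => simp
  | succ c ih =>
    rw [pow_succ, ih]
    rcases Nat.mod_two_eq_zero_or_one c with h | h <;> simp [h, Nat.add_mod]

-- the pair condition A's double loop counts: within-group and out of order
def pvR (perm g1 g2 : List Int) (i j : Int) : Bool :=
  ((g1.contains i && g1.contains j) || (g2.contains i && g2.contains j))
    && decide (PySem.List.pyGetD perm j 0 < PySem.List.pyGetD perm i 0)

lemma pv_set_contains (g : List Int) (i : Int) :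
    PySem.Set.contains (PySem.Set.ofList g) i = g.contains i := by
  rw [PySem.Set.contains_eq_listContains]
  rw [Bool.eq_iff_iff]
  simp [PySem.Set.mem_ofList]

lemma pv_A_loop (perm g1 g2 : List Int) (n : Int) :
    ∀ (k : Nat) (a t : Int), (n - a).toNat ≤ k →
      (PySem.List.pyRange a n 1).foldl (fun t i =>
        (PySem.List.pyRange (i + 1) n 1).foldl (fun t j =>
          if (g1.contains i && g1.contains j) || (g2.contains i && g2.contains j) then
            (if PySem.List.pyGetD perm j 0 < PySem.List.pyGetD perm i 0 then t * (-1) else t)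
          else if (g1.contains i && g2.contains j) || (g2.contains i && g1.contains j) then
            (if PySem.List.pyGetD perm j 0 < PySem.List.pyGetD perm i 0 then t * 1 else t)
          else t) t) t
      = t * (-1) ^ pvPairCount (pvR perm g1 g2) (PySem.List.pyRange a n 1) := by
  intro k
  induction k with
  | zero =>
    intro a t h
    have h0 : (n - a).toNat = 0 := by omega
    simp [PySem.List.pyRange_one, h0, pvPairCount]
  | succ k ih =>
    intro a t h
    by_cases hlt : a < n
    · rw [PySem.List.pyRange_one_cons hlt]
      simp only [List.foldl_cons]
      rw [ih (a + 1) _ (by omega)]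
      rw [pv_foldl_sign (pvR perm g1 g2 a)
        (fun t j =>
          if (g1.contains a && g1.contains j) || (g2.contains a && g2.contains j) then
            (if PySem.List.pyGetD perm j 0 < PySem.List.pyGetD perm a 0 then t * (-1) else t)
          else if (g1.contains a && g2.contains j) || (g2.contains a && g1.contains j) then
            (if PySem.List.pyGetD perm j 0 < PySem.List.pyGetD perm a 0 then t * 1 else t)
          else t)
        (by
          intro t x
          simp only [pvR]
          by_cases h1 : ((g1.contains a && g1.contains x) || (g2.contains a && g2.contains x)) = true
          · simp only [h1, if_true, Bool.true_and, decide_eq_true_eq]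
            split_ifs <;> ring
          · have h1' : ((g1.contains a && g1.contains x) || (g2.contains a && g2.contains x)) = false := by
              simpa using h1
            simp only [h1', Bool.false_eq_true, if_false, Bool.false_and]
            split_ifs <;> ring)]
      simp only [pvPairCount]
      rw [pow_add]
      ring
    · have h0 : (n - a).toNat = 0 := by omega
      simp [PySem.List.pyRange_one, h0, pvPairCount]

-- ===== VERDICT (by name: the statement is the Claim_ definition above) =====
theorem count_transpositions_baryons_spec : Claim_equal_count_transpositions_baryons := by
  unfold Claim_equal_count_transpositions_baryons
  intro perm g1 g2 _
  unfold Spec_count_transpositions_baryons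
  have hA : count_transpositions_baryons perm g1 g2
      = (-1) ^ pvPairCount (pvR perm g1 g2) (PySem.List.pyRange 0 (perm.length : Int) 1) := by
    have := pv_A_loop perm g1 g2 (perm.length : Int) ((perm.length : Int) - 0).toNat 0 1 (le_refl _)
    simpa [count_transpositions_baryons] using this
  have hg1 : (fun i => PySem.Set.contains (PySem.Set.ofList g1) i) = (fun i => g1.contains i) :=
    funext fun i => pv_set_contains g1 i
  have hg2 : (fun i => PySem.Set.contains (PySem.Set.ofList g2) i) = (fun i => g2.contains i) :=
    funext fun i => pv_set_contains g2 i
  have hg12 : (fun i => PySem.Set.contains (PySem.Set.ofList g1) i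
        && PySem.Set.contains (PySem.Set.ofList g2) i)
      = (fun i => g1.contains i && g2.contains i) := by
    funext i
    rw [pv_set_contains, pv_set_contains]
  have hc1 : (pvSortCount (((PySem.List.pyRange 0 (perm.length : Int) 1).filter
        (fun i => PySem.Set.contains (PySem.Set.ofList g1) i)).map
        (fun i => PySem.List.pyGetD perm i 0))).2
      = pvPairCount (fun a b => g1.contains a && (g1.contains b
          && decide (PySem.List.pyGetD perm b 0 < PySem.List.pyGetD perm a 0)))
        (PySem.List.pyRange 0 (perm.length : Int) 1) := by
    rw [(pvSortCount_spec _).2.2, hg1, pv_inv_filter]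
  have hc2 : (pvSortCount (((PySem.List.pyRange 0 (perm.length : Int) 1).filter
        (fun i => PySem.Set.contains (PySem.Set.ofList g2) i)).map
        (fun i => PySem.List.pyGetD perm i 0))).2
      = pvPairCount (fun a b => g2.contains a && (g2.contains b
          && decide (PySem.List.pyGetD perm b 0 < PySem.List.pyGetD perm a 0)))
        (PySem.List.pyRange 0 (perm.length : Int) 1) := by
    rw [(pvSortCount_spec _).2.2, hg2, pv_inv_filter]
  have hc12 : (pvSortCount (((PySem.List.pyRange 0 (perm.length : Int) 1).filter
        (fun i => PySem.Set.contains (PySem.Set.ofList g1) i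
          && PySem.Set.contains (PySem.Set.ofList g2) i)).map
        (fun i => PySem.List.pyGetD perm i 0))).2
      = pvPairCount (fun a b => (g1.contains a && g2.contains a) && ((g1.contains b && g2.contains b)
          && decide (PySem.List.pyGetD perm b 0 < PySem.List.pyGetD perm a 0)))
        (PySem.List.pyRange 0 (perm.length : Int) 1) := by
    rw [(pvSortCount_spec _).2.2, hg12, pv_inv_filter]
  have hkey : ∀ (c1 c2 c12 cF : Nat), cF + c12 = c1 + c2 →
      ((-1 : Int) ^ cF
        = if PySem.Int.mod ((c1 : Int) + (c2 : Int) - (c12 : Int)) 2 ≠ 0 then -1 else 1) := by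
    intro c1 c2 c12 cF hie
    have htot : ((c1 : Int) + (c2 : Int) - (c12 : Int)) = (cF : Int) := by omega
    rw [htot, pv_neg_one_pow]
    have hmod : PySem.Int.mod (cF : Int) 2 = ((cF % 2 : Nat) : Int) := by
      rw [PySem.Int.mod_eq_emod_of_pos (by omega)]
      omega
    rw [hmod]
    by_cases hpar : cF % 2 = 0
    · simp [hpar]
    · rw [if_neg hpar, if_pos (by omega)]
  have hIE := pv_pairCount_ie (fun i => g1.contains i) (fun i => g2.contains i)
    (fun i j => decide (PySem.List.pyGetD perm j 0 < PySem.List.pyGetD perm i 0))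
    (PySem.List.pyRange 0 (perm.length : Int) 1)
  simp only [count_transpositions_baryons_alt]
  rw [hc1, hc2, hc12, hA]
  exact hkey _ _ _ _ hIE
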